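-- pv_equiv track=rewrite | github.com/Griffon2012/python_homework4 | task1_A_B.py | GetAmountPolynomialData
-- ===== SOURCE A (Python) =====
-- def GetAmountPolynomialData(data1, data2):
--     myDictionary = {}
--     sum = 0
--     for key in data1:
--         sum = data1.get(key) + data2.get(key, 0)
--         if sum != 0:
--             myDictionary[key] = sum
--
--     for key in data2:
--         if data1.get(key, None) == None and data2.get(key) != 0:
--             myDictionary[key] = data2.get(key)
--
--     return myDictionary
-- ===== SOURCE B (Python) =====
-- def GetAmountPolynomialData(data1, data2):
--     totals = dict(data1)
--     for key, value in data2.items():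
--         totals[key] = totals.get(key, 0) + value
--     return {k: v for k, v in totals.items() if v != 0}
-- ===== Notes on version B (the rewrite author's own statement) =====
-- stated objective: simpler
-- what changed: Replaces A's two conditional-insert loops (per-key lookups into both dicts plus a membership test) with accumulate-then-filter: fold data2's values into a running totals dict copied from data1, then filter out zero totals in a separate stage; no membership tests or cross-dict lookups remain.
import Mathlib
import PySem

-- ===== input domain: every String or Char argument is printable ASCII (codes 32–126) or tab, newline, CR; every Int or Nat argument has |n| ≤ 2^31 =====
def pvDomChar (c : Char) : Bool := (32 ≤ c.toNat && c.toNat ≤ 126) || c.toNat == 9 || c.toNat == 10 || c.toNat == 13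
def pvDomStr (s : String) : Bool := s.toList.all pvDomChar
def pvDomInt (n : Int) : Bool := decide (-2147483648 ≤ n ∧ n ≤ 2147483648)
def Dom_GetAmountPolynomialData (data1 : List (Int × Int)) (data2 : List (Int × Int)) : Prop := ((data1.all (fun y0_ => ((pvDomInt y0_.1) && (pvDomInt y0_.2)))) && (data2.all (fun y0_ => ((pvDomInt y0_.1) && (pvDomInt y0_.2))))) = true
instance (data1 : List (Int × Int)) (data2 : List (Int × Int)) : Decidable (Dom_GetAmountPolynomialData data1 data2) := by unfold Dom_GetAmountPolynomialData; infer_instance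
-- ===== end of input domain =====

-- ===== PORT A =====
-- B replaces A's two conditional-insert loops with accumulate-then-filter (same cost; simpler).
-- Port of A. `data1.get(key)` / `data2.get(key)` inside the loops have the key guaranteed present
-- (it comes from that dict's own keys), so `getD _ 0` is exact there.
def GetAmountPolynomialData (data1 : List (Int × Int)) (data2 : List (Int × Int)) : List (Int × Int) :=
  let d1 := PySem.Dict.ofList data1
  let d2 := PySem.Dict.ofList data2
  let m1 := d1.keys.foldl (fun md key =>
      let s := d1.getD key 0 + d2.getD key 0
      if s ≠ 0 then md.insert key s else md) PySem.Dict.empty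
  let m2 := d2.keys.foldl (fun md key =>
      if d1.get? key = none ∧ d2.getD key 0 ≠ 0 then md.insert key (d2.getD key 0) else md) m1
  m2.items

-- ===== PORT B =====
-- Port of B: copy data1 into `totals`, fold data2's (key, value) pairs in by addition,
-- then the final dict comprehension keeps the items with nonzero total (unique keys, so a filter).
def GetAmountPolynomialData_alt (data1 : List (Int × Int)) (data2 : List (Int × Int)) : List (Int × Int) :=
  let totals := (PySem.Dict.ofList data2).items.foldl
      (fun t p => t.insert p.1 (t.getD p.1 0 + p.2)) (PySem.Dict.ofList data1)
  totals.items.filter (fun p => p.2 ≠ 0)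

-- ===== PRECONDITION & SPEC =====
def Spec_GetAmountPolynomialData (data1 : List (Int × Int)) (data2 : List (Int × Int)) (out : List (Int × Int)) : Prop := out = GetAmountPolynomialData_alt data1 data2
instance (data1 : List (Int × Int)) (data2 : List (Int × Int)) (out : List (Int × Int)) : Decidable (Spec_GetAmountPolynomialData data1 data2 out) := by unfold Spec_GetAmountPolynomialData; infer_instance

-- ===== CLAIM (what is proved, stated in full; the proofs are below) =====
def Claim_equal_GetAmountPolynomialData : Prop := ∀ (data1 : List (Int × Int)) (data2 : List (Int × Int)), Dom_GetAmountPolynomialData data1 data2 → Spec_GetAmountPolynomialData data1 data2 (GetAmountPolynomialData data1 data2)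

-- ===== LEMMAS AND PROOFS =====

-- A's loops: inserting at fresh distinct keys appends, so the items are a filterMap.
theorem foldl_insert_if_items (v : Int → Int) (p : Int → Prop) [DecidablePred p] :
    ∀ (l : List Int) (md : PySem.Dict Int Int), l.Nodup →
      (∀ k ∈ l, p k → md.contains k = false) →
      (l.foldl (fun d k => if p k then d.insert k (v k) else d) md).items
        = md.items ++ l.filterMap (fun k => if p k then some (k, v k) else none) := by
  intro l
  induction l with
  | nil => intro md _ _; simp
  | cons k t ih =>
    intro md hnd hfresh
    simp only [List.foldl_cons, List.filterMap_cons]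
    by_cases hp : p k
    · have hk : md.contains k = false := hfresh k (by simp) hp
      rw [if_pos hp, if_pos hp, ih _ hnd.of_cons ?fresh,
          PySem.Dict.items_insert_of_not_contains (h := hk)]
      · simp
      case fresh =>
        intro k' hk' hp'
        have hne : k' ≠ k := fun h => (List.nodup_cons.mp hnd).1 (h ▸ hk')
        rw [PySem.Dict.contains_insert]
        simp [hne, hfresh k' (by simp [hk']) hp']
    · rw [if_neg hp, if_neg hp, ih _ hnd.of_cons (fun k' h => hfresh k' (by simp [h]))]

-- B's loop: the lookup in the accumulated totals dict.
theorem get?_foldl_insert_add :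
    ∀ (l : List (Int × Int)) (t : PySem.Dict Int Int), (l.map Prod.fst).Nodup → ∀ (k : Int),
      (l.foldl (fun t p => t.insert p.1 (t.getD p.1 0 + p.2)) t).get? k
        = if k ∈ l.map Prod.fst then some (t.getD k 0 + (PySem.Dict.mk l).getD k 0) else t.get? k := by
  intro l
  induction l with
  | nil => intro t _ k; simp
  | cons q rest ih =>
    obtain ⟨a, b⟩ := q
    intro t hnd k
    simp only [List.foldl_cons]
    rw [ih _ (by simpa using hnd.of_cons)]
    by_cases hmem : k ∈ rest.map Prod.fst
    · have hne : k ≠ a := fun h => (List.nodup_cons.mp hnd).1 (h ▸ hmem)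
      have hab : (a == k) = false := by simp [Ne.symm hne]
      have hgd : (PySem.Dict.mk ((a, b) :: rest)).getD k 0 = (PySem.Dict.mk rest).getD k 0 := by
        rw [PySem.Dict.getD_eq_get?_getD, PySem.Dict.get?_mk_cons, hab]
        simp [PySem.Dict.getD_eq_get?_getD]
      simp [hmem, hne, PySem.Dict.getD_insert_of_ne, hgd]
    · rw [if_neg hmem]
      by_cases hq : k = a
      · subst hq
        have hgd : (PySem.Dict.mk ((k, b) :: rest)).getD k 0 = b := by
          rw [PySem.Dict.getD_eq_get?_getD, PySem.Dict.get?_mk_cons]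
          simp
        simp [hmem, hgd, PySem.Dict.get?_insert_self]
      · simp [hmem, hq, PySem.Dict.get?_insert_of_ne]

theorem filterMap_if_eq_filter_map (q : Int → Int) :
    ∀ (l : List Int),
      (l.map (fun k => (k, q k))).filter (fun p => decide (p.2 ≠ 0))
        = l.filterMap (fun k => if q k ≠ 0 then some (k, q k) else none) := by
  intro l
  induction l with
  | nil => rfl
  | cons k t ih =>
    simp only [List.map_cons, List.filter_cons, List.filterMap_cons]
    by_cases hq : q k = 0
    · simpa [hq] using ih
    · simpa [hq] using ih

-- every total in the accumulated dict is the sum of the two lookups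
theorem getD_totals (d1 d2 : PySem.Dict Int Int) (hK2 : d2.keys.Nodup) (k : Int) :
    (d2.items.foldl (fun t p => t.insert p.1 (t.getD p.1 0 + p.2)) d1).getD k 0
      = d1.getD k 0 + d2.getD k 0 := by
  have hmk : PySem.Dict.mk d2.items = d2 := PySem.Dict.ext rfl
  have h := get?_foldl_insert_add d2.items d1 (by exact hK2) k
  rw [hmk] at h
  rw [PySem.Dict.getD_eq_get?_getD, h]
  by_cases hmem : k ∈ d2.items.map Prod.fst
  · simp [hmem]
  · have hget : d2.get? k = none :=
      (PySem.Dict.get?_eq_none_iff_not_mem_keys d2 k).mpr hmem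
    have : d2.getD k 0 = 0 := PySem.Dict.getD_of_get?_eq_none d2 0 hget
    rw [if_neg hmem, this, ← PySem.Dict.getD_eq_get?_getD]
    omega

-- B's result as a filterMap over the unioned key list
theorem altB_eq (d1 d2 : PySem.Dict Int Int) (hK1 : d1.keys.Nodup) (hK2 : d2.keys.Nodup) :
    ((d2.items.foldl (fun t p => t.insert p.1 (t.getD p.1 0 + p.2)) d1).items.filter
        (fun p => decide (p.2 ≠ 0)))
      = (PySem.Set.update d1.keys d2.keys).filterMap
          (fun k => if d1.getD k 0 + d2.getD k 0 ≠ 0 then some (k, d1.getD k 0 + d2.getD k 0) else none) := by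
  set totals := d2.items.foldl (fun t p => t.insert p.1 (t.getD p.1 0 + p.2)) d1 with ht
  have hkeys : totals.keys = PySem.Set.update d1.keys (d2.items.map Prod.fst) :=
    PySem.Dict.keys_foldl_insert_key d2.items Prod.fst (fun t p => t.getD p.1 0 + p.2) d1
  have hnd : totals.keys.Nodup :=
    PySem.Dict.nodup_keys_foldl_insert_key d2.items Prod.fst (fun t p => t.getD p.1 0 + p.2) d1 hK1
  have hitems : totals.items = totals.keys.map (fun k => (k, totals.getD k 0)) :=
    PySem.Dict.items_eq_map_keys totals hnd 0
  rw [hitems]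
  have hmap : totals.keys.map (fun k => (k, totals.getD k 0))
      = totals.keys.map (fun k => (k, d1.getD k 0 + d2.getD k 0)) :=
    List.map_congr_left (fun k _ => by rw [ht, getD_totals d1 d2 hK2 k])
  rw [hmap, filterMap_if_eq_filter_map, hkeys]
  rfl

-- A's two loops produce the same filterMap over the unioned key list.
theorem merge_items_eq (d1 d2 : PySem.Dict Int Int) (hK1 : d1.keys.Nodup) (hK2 : d2.keys.Nodup) :
    (d2.keys.foldl (fun md key =>
        if d1.get? key = none ∧ d2.getD key 0 ≠ 0 then md.insert key (d2.getD key 0) else md)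
      (d1.keys.foldl (fun md key =>
        if d1.getD key 0 + d2.getD key 0 ≠ 0 then md.insert key (d1.getD key 0 + d2.getD key 0) else md)
        PySem.Dict.empty)).items
    = (PySem.Set.update d1.keys d2.keys).filterMap
        (fun k => if d1.getD k 0 + d2.getD k 0 ≠ 0 then some (k, d1.getD k 0 + d2.getD k 0) else none) := by
  have h1 := foldl_insert_if_items (fun k => d1.getD k 0 + d2.getD k 0)
      (fun k => d1.getD k 0 + d2.getD k 0 ≠ 0) d1.keys PySem.Dict.empty hK1
      (by intro k _ _; simp)
  set m1 := d1.keys.foldl (fun md key =>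
      if d1.getD key 0 + d2.getD key 0 ≠ 0 then md.insert key (d1.getD key 0 + d2.getD key 0) else md)
      PySem.Dict.empty with hm1
  have hemp : (PySem.Dict.empty : PySem.Dict Int Int).items = [] := rfl
  rw [hemp, List.nil_append] at h1
  have hm1k : ∀ k : Int, m1.contains k = true → k ∈ d1.keys := by
    intro k hk
    have := (PySem.Dict.contains_iff_mem_keys m1 k).mp hk
    rw [show m1.keys = m1.items.map Prod.fst from rfl, h1] at this
    obtain ⟨⟨a, b⟩, hmem, rfl⟩ := List.mem_map.mp this
    obtain ⟨x, hx, hfx⟩ := List.mem_filterMap.mp hmem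
    split at hfx
    · cases hfx; exact hx
    · cases hfx
  have h2 := foldl_insert_if_items (fun k => d2.getD k 0)
      (fun k => d1.get? k = none ∧ d2.getD k 0 ≠ 0) d2.keys m1 hK2
      (by
        intro k _ hp
        by_contra hc
        have : m1.contains k = true := by simpa using hc
        exact (PySem.Dict.get?_eq_none_iff_not_mem_keys d1 k).mp hp.1 (hm1k k this))
  rw [h2, h1]
  rw [PySem.Set.update_eq_append_filter]
  rw [PySem.Set.ofList_eq_self_of_nodup d2.keys hK2]
  rw [List.filterMap_append]
  congr 1
  rw [List.filterMap_filter]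
  apply List.filterMap_congr
  intro k _
  by_cases hk : k ∈ d1.keys
  · have hc : PySem.Set.contains d1.keys k = true := (PySem.Set.contains_iff _ _).mpr hk
    have hg : ¬ d1.get? k = none := fun h => (PySem.Dict.get?_eq_none_iff_not_mem_keys d1 k).mp h hk
    simp [hg, hk]
  · have hc : PySem.Set.contains d1.keys k = false := by
      by_contra h
      exact hk ((PySem.Set.contains_iff _ _).mp (by simpa using h))
    have hg : d1.get? k = none := (PySem.Dict.get?_eq_none_iff_not_mem_keys d1 k).mpr hk
    have hd : d1.getD k 0 = 0 := PySem.Dict.getD_of_get?_eq_none d1 0 hg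
    simp [hg, hd, hk]

-- ===== VERDICT (by name: the statement is the Claim_ definition above) =====
theorem GetAmountPolynomialData_spec : Claim_equal_GetAmountPolynomialData := by
  intro data1 data2 _
  unfold Spec_GetAmountPolynomialData GetAmountPolynomialData GetAmountPolynomialData_alt
  rw [merge_items_eq (PySem.Dict.ofList data1) (PySem.Dict.ofList data2)
        (PySem.Dict.nodup_keys_ofList data1) (PySem.Dict.nodup_keys_ofList data2),
      altB_eq (PySem.Dict.ofList data1) (PySem.Dict.ofList data2)
        (PySem.Dict.nodup_keys_ofList data1) (PySem.Dict.nodup_keys_ofList data2)]
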